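-- pv_equiv track=rewrite | github.com/PaulineTurk/bioinfo | blosum_lab/src/alignment/clustering.py | build_identity_graph
-- ===== SOURCE A (Python) =====
-- from typing import Dict, Set
--
-- def build_identity_graph(
--     pairwise_identity: list,
--     threshold: int
-- ) -> Dict[str, Set[str]]:
--     graph: Dict[str, Set[str]] = {}
--
--     for _, id1, id2, identity in pairwise_identity:
--         if id1 not in graph: graph[id1] = set()
--         if id2 not in graph: graph[id2] = set()
--         if identity >= threshold:
--             graph[id1].add(id2)
--             graph[id2].add(id1)
--     return graph
-- ===== SOURCE B (Python) =====
-- def build_identity_graph(pairwise_identity, threshold):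
--     # stage 1: all vertices, in first-appearance order
--     nodes = list(dict.fromkeys(n for _, a, b, _ in pairwise_identity for n in (a, b)))
--     # stage 2: the accepted edge list
--     edges = [(a, b) for _, a, b, ident in pairwise_identity if ident >= threshold]
--     # stage 3: per node, gather its partners by scanning the edge list
--     graph = {}
--     for n in nodes:
--         nbrs = set()
--         for a, b in edges:
--             if a == n:
--                 nbrs.add(b)
--             if b == n:
--                 nbrs.add(a)
--         graph[n] = nbrs
--     return graph
-- ===== Notes on version B (the rewrite author's own statement) =====
-- stated objective: alternative
-- what changed: B replaces A's single incremental pass over a growing dict by a staged gather: it first materializes the deduplicated node list and the accepted edge list, then builds each node's adjacency set independently by scanning the edge list per node (O(V*E) gather instead of A's O(E) incremental updates).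
import Mathlib
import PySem

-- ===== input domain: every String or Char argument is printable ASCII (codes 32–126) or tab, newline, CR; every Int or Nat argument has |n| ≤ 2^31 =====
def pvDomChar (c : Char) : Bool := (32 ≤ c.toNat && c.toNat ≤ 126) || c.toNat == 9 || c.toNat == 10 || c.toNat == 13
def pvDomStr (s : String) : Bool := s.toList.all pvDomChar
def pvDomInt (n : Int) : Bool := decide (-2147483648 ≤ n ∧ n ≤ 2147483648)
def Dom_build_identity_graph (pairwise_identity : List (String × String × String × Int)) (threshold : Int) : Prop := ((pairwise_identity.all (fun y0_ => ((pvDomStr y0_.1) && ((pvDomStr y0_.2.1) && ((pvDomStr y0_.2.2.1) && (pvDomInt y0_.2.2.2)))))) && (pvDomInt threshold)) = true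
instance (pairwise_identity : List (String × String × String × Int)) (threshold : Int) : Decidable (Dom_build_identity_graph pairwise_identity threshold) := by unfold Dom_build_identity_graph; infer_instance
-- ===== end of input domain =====

-- B builds the graph in three stages (dedup node list, accepted edge list, then a per-node gather over the edge list) instead of A's one incremental pass; objective: alternative decomposition, not faster.


-- ===== PORT A =====
def build_identity_graph (pairwise_identity : List (String × String × String × Int)) (threshold : Int) : List (String × List String) :=
  (pairwise_identity.foldl
    (fun (graph : PySem.Dict String (PySem.Set String)) t =>
      let id1 := t.2.1
      let id2 := t.2.2.1
      let identity := t.2.2.2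
      let graph := if graph.contains id1 then graph else graph.insert id1 PySem.Set.empty
      let graph := if graph.contains id2 then graph else graph.insert id2 PySem.Set.empty
      if identity ≥ threshold then
        -- graph[id1].add(id2); graph[id2].add(id1)  (keys are present here)
        (graph.modify id1 PySem.Set.empty (fun s => PySem.Set.add s id2)).modify id2 PySem.Set.empty (fun s => PySem.Set.add s id1)
      else graph)
    PySem.Dict.empty).items

-- ===== PORT B =====
def build_identity_graph_alt (pairwise_identity : List (String × String × String × Int)) (threshold : Int) : List (String × List String) :=
  -- stage 1: nodes = list(dict.fromkeys(...)), first-appearance dedup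
  let nodes := PySem.List.dedup (pairwise_identity.flatMap (fun t => [t.2.1, t.2.2.1]))
  -- stage 2: edges = [(a, b) for _, a, b, ident in pairwise_identity if ident >= threshold]
  let edges := pairwise_identity.filterMap (fun t => if t.2.2.2 ≥ threshold then some (t.2.1, t.2.2.1) else none)
  -- stage 3: for each node, gather its partners by scanning the edge list
  (nodes.foldl
    (fun (graph : PySem.Dict String (PySem.Set String)) n =>
      graph.insert n (edges.foldl
        (fun (nbrs : PySem.Set String) e =>
          let nbrs := if e.1 == n then PySem.Set.add nbrs e.2 else nbrs
          if e.2 == n then PySem.Set.add nbrs e.1 else nbrs)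
        PySem.Set.empty))
    PySem.Dict.empty).items

-- ===== PRECONDITION & SPEC =====
def Spec_build_identity_graph (pairwise_identity : List (String × String × String × Int)) (threshold : Int) (out : List (String × List String)) : Prop := out = build_identity_graph_alt pairwise_identity threshold
instance (pairwise_identity : List (String × String × String × Int)) (threshold : Int) (out : List (String × List String)) : Decidable (Spec_build_identity_graph pairwise_identity threshold out) := by unfold Spec_build_identity_graph; infer_instance

-- ===== CLAIM (what is proved, stated in full; the proofs are below) =====
def Claim_equal_build_identity_graph : Prop := ∀ (pairwise_identity : List (String × String × String × Int)) (threshold : Int), Dom_build_identity_graph pairwise_identity threshold → Spec_build_identity_graph pairwise_identity threshold (build_identity_graph pairwise_identity threshold)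

-- ===== LEMMAS AND PROOFS =====

-- named pieces of A's single pass (definitionally the lambda in the A port)
def pvSd (g : PySem.Dict String (PySem.Set String)) (a : String) : PySem.Dict String (PySem.Set String) :=
  if g.contains a then g else g.insert a PySem.Set.empty

def pvEstep (threshold : Int) (g : PySem.Dict String (PySem.Set String))
    (t : String × String × String × Int) : PySem.Dict String (PySem.Set String) :=
  if t.2.2.2 ≥ threshold then
    (g.modify t.2.1 PySem.Set.empty (fun s => PySem.Set.add s t.2.2.1)).modify t.2.2.1 PySem.Set.empty (fun s => PySem.Set.add s t.2.1)
  else g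

def pvAstep (threshold : Int) (g : PySem.Dict String (PySem.Set String))
    (t : String × String × String × Int) : PySem.Dict String (PySem.Set String) :=
  pvEstep threshold (pvSd (pvSd g t.2.1) t.2.2.1) t

def pvFlat (l : List (String × String × String × Int)) : List String :=
  l.flatMap (fun t => [t.2.1, t.2.2.1])

-- named pieces of B's staged build
def pvEdges (l : List (String × String × String × Int)) (th : Int) : List (String × String) :=
  l.filterMap (fun t => if t.2.2.2 ≥ th then some (t.2.1, t.2.2.1) else none)

def pvBstep (n : String) (nbrs : PySem.Set String) (e : String × String) : PySem.Set String :=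
  let nbrs := if e.1 == n then PySem.Set.add nbrs e.2 else nbrs
  if e.2 == n then PySem.Set.add nbrs e.1 else nbrs

def pvNbrs (l : List (String × String × String × Int)) (th : Int) (n : String) : PySem.Set String :=
  (pvEdges l th).foldl (pvBstep n) PySem.Set.empty

lemma pvA_eq_fold (l : List (String × String × String × Int)) (th : Int) :
    build_identity_graph l th = (l.foldl (pvAstep th) PySem.Dict.empty).items := rfl

lemma pvB_eq_fold (l : List (String × String × String × Int)) (th : Int) :
    build_identity_graph_alt l th =
      ((PySem.List.dedup (pvFlat l)).foldl
        (fun (g : PySem.Dict String (PySem.Set String)) n => g.insert n (pvNbrs l th n))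
        PySem.Dict.empty).items := rfl

lemma pvGetD_sd (g : PySem.Dict String (PySem.Set String)) (a k : String) :
    (pvSd g a).getD k PySem.Set.empty = g.getD k PySem.Set.empty := by
  unfold pvSd
  by_cases h : g.contains a = true
  · simp [h]
  · simp only [Bool.not_eq_true] at h
    simp only [h, if_neg Bool.false_ne_true, PySem.Dict.getD_insert]
    by_cases hk : k = a
    · subst hk; rw [PySem.Dict.getD_of_not_contains g _ h]; simp
    · simp [hk]

-- A's step, seen through a single key: exactly B's gather step on the accepted edge
lemma pvGetD_astep (th : Int) (g : PySem.Dict String (PySem.Set String))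
    (t : String × String × String × Int) (k : String) :
    (pvAstep th g t).getD k PySem.Set.empty =
      if t.2.2.2 ≥ th then pvBstep k (g.getD k PySem.Set.empty) (t.2.1, t.2.2.1)
      else g.getD k PySem.Set.empty := by
  unfold pvAstep pvEstep pvBstep
  split
  · simp only [PySem.Dict.getD_modify, pvGetD_sd]
    by_cases h1 : k = t.2.1 <;> by_cases h2 : k = t.2.2.1 <;>
      simp only [h1, h2, beq_iff_eq, if_true, if_false, beq_self_eq_true]
    · have e : t.2.1 = t.2.2.1 := h1.symm.trans h2
      simp [e]
    · have e : t.2.2.1 ≠ t.2.1 := fun he => h2 (h1.trans he.symm)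
      simp [e, e.symm]
    · have e : t.2.1 ≠ t.2.2.1 := fun he => h1 (h2.trans he.symm)
      simp [e, e.symm]
    · simp [Ne.symm h1, Ne.symm h2]
  · rw [pvGetD_sd, pvGetD_sd]

-- through the whole list: A's accumulator at key k is B's per-node gather over the edge list
lemma pvGetD_fold (l : List (String × String × String × Int)) (th : Int) (k : String) :
    ∀ g, (l.foldl (pvAstep th) g).getD k PySem.Set.empty
      = (pvEdges l th).foldl (pvBstep k) (g.getD k PySem.Set.empty) := by
  induction l with
  | nil => intro g; rfl
  | cons t l ih =>
      intro g
      rw [List.foldl_cons, ih]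
      unfold pvEdges
      rw [List.filterMap_cons]
      by_cases h : t.2.2.2 ≥ th
      · simp only [h, if_pos, List.foldl_cons, pvGetD_astep]
      · simp only [h, pvGetD_astep]
        simp

-- keys of A's fold: first-appearance order of all ids
lemma pvKeys_sd (g : PySem.Dict String (PySem.Set String)) (a : String) :
    (pvSd g a).keys = PySem.Set.add g.keys a := by
  unfold pvSd PySem.Set.add
  by_cases h : g.contains a = true
  · have h2 := h
    rw [PySem.Dict.contains_eq_decide_mem_keys] at h2
    simp only [decide_eq_true_eq] at h2
    simp [h, PySem.Set.contains, h2]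
  · simp only [Bool.not_eq_true] at h
    have h2 := h
    rw [PySem.Dict.contains_eq_decide_mem_keys] at h2
    simp only [decide_eq_false_iff_not] at h2
    simp only [h, Bool.false_eq_true, if_false]
    rw [PySem.Dict.keys_insert_of_not_contains g _ h]
    simp [PySem.Set.contains, h2]

lemma pvKeys_estep (th : Int) (g : PySem.Dict String (PySem.Set String))
    (t : String × String × String × Int) (h1 : t.2.1 ∈ g.keys) (h2 : t.2.2.1 ∈ g.keys) :
    (pvEstep th g t).keys = g.keys := by
  unfold pvEstep
  have c0 : g.contains t.2.1 = true := by
    rw [PySem.Dict.contains_eq_decide_mem_keys]; simpa using h1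
  have c1 : (g.modify t.2.1 PySem.Set.empty (fun s => PySem.Set.add s t.2.2.1)).contains t.2.2.1 = true := by
    rw [PySem.Dict.contains_eq_decide_mem_keys, PySem.Dict.keys_modify]
    rw [PySem.Dict.keys_insert_of_contains g _ c0]
    simpa using h2
  split
  · rw [PySem.Dict.keys_modify, PySem.Dict.keys_insert_of_contains _ _ c1]
    rw [PySem.Dict.keys_modify, PySem.Dict.keys_insert_of_contains g _ c0]
  · rfl

lemma pvKeys_astep (th : Int) (g : PySem.Dict String (PySem.Set String))
    (t : String × String × String × Int) :
    (pvAstep th g t).keys = PySem.Set.add (PySem.Set.add g.keys t.2.1) t.2.2.1 := by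
  unfold pvAstep
  have m1 : t.2.1 ∈ (pvSd (pvSd g t.2.1) t.2.2.1).keys := by
    rw [pvKeys_sd, pvKeys_sd]
    simp [PySem.Set.mem_add]
  have m2 : t.2.2.1 ∈ (pvSd (pvSd g t.2.1) t.2.2.1).keys := by
    rw [pvKeys_sd, pvKeys_sd]
    simp [PySem.Set.mem_add]
  rw [pvKeys_estep th _ t m1 m2, pvKeys_sd, pvKeys_sd]

lemma pvKeysA_fold (l : List (String × String × String × Int)) (th : Int)
    (g : PySem.Dict String (PySem.Set String)) :
    (l.foldl (pvAstep th) g).keys = (pvFlat l).foldl PySem.Set.add g.keys := by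
  induction l generalizing g with
  | nil => rfl
  | cons t l ih =>
      rw [List.foldl_cons, ih, pvKeys_astep]
      rfl

-- ===== VERDICT (by name: the statement is the Claim_ definition above) =====
theorem build_identity_graph_spec : Claim_equal_build_identity_graph := by
  intro l th _
  unfold Spec_build_identity_graph
  rw [pvA_eq_fold, pvB_eq_fold]
  have hkeysA : (l.foldl (pvAstep th) PySem.Dict.empty).keys = PySem.List.dedup (pvFlat l) := by
    rw [pvKeysA_fold, PySem.Dict.keys_empty, ← PySem.Set.ofList_eq_foldl,
        PySem.List.dedup_eq_ofList]
  have hnodup : (PySem.List.dedup (pvFlat l)).Nodup := by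
    rw [PySem.List.dedup_eq_ofList]; exact PySem.Set.nodup_ofList _
  have hnodupA : (l.foldl (pvAstep th) PySem.Dict.empty).keys.Nodup := by
    rw [hkeysA]; exact hnodup
  -- B's side: a fold of inserts at fresh distinct keys appends its items
  have hB := PySem.Dict.items_foldl_insert_fresh (PySem.List.dedup (pvFlat l))
      (fun n => n) (fun n => pvNbrs l th n) PySem.Dict.empty
      (fun a _ => PySem.Dict.contains_empty a) (by rw [List.map_id_fun']; exact hnodup)
  rw [hB]
  rw [PySem.Dict.items_eq_map_keys _ hnodupA PySem.Set.empty, hkeysA]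
  apply List.map_congr_left
  intro k _
  rw [pvGetD_fold l th k PySem.Dict.empty]
  simp [pvNbrs, PySem.Dict.getD_empty]
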